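-- pv_equiv track=rewrite | github.com/bdmorin/hcom | test/unit/test_validation.py | simple_mention_finder
-- ===== SOURCE A (Python) =====
-- def simple_mention_finder(text: str) -> list[str]:
--     r"""Reference implementation for mention finding
--
--     Must match regex behavior: @([a-zA-Z0-9][\w:-]*)
--     - First char must be alphanumeric (letter or digit)
--     - Subsequent chars can include underscore, hyphen, and colon (for device suffix)
--     """
--     mentions = []
--     i = 0
--     while i < len(text):
--         if text[i] == '@':
--             # Check previous char (negative lookbehind)
--             if i > 0 and text[i-1] in 'abcdefghijklmnopqrstuvwxyzABCDEFGHIJKLMNOPQRSTUVWXYZ0123456789._-':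
--                 i += 1
--                 continue
--
--             # Extract username
--             username = []
--             j = i + 1
--
--             # First character must be alphanumeric (not _ or - or :)
--             if j < len(text) and text[j] in 'abcdefghijklmnopqrstuvwxyzABCDEFGHIJKLMNOPQRSTUVWXYZ0123456789':
--                 username.append(text[j])
--                 j += 1
--
--                 # Rest can include underscore, hyphen, and colon
--                 while j < len(text) and text[j] in 'abcdefghijklmnopqrstuvwxyzABCDEFGHIJKLMNOPQRSTUVWXYZ0123456789_-:':
--                     username.append(text[j])
--                     j += 1
--
--             if username:
--                 mentions.append(''.join(username))
--             i = max(j, i + 1)  # Ensure we always advance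
--         else:
--             i += 1
--
--     return mentions
-- ===== SOURCE B (Python) =====
-- LOOK = "abcdefghijklmnopqrstuvwxyzABCDEFGHIJKLMNOPQRSTUVWXYZ0123456789._-"
-- START = "abcdefghijklmnopqrstuvwxyzABCDEFGHIJKLMNOPQRSTUVWXYZ0123456789"
-- CONT = "abcdefghijklmnopqrstuvwxyzABCDEFGHIJKLMNOPQRSTUVWXYZ0123456789_-:"
--
--
-- def simple_mention_finder(text: str) -> list[str]:
--     """Split on '@' once; each boundary between adjacent parts is one '@'.
--
--     The part before the '@' decides the lookbehind, the part after it
--     yields the mention name (first char alphanumeric, then a run of CONT).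
--     """
--     parts = text.split('@')
--     mentions = []
--     for prev, part in zip(parts, parts[1:]):
--         if prev and prev[-1] in LOOK:
--             continue  # lookbehind: '@' preceded by a word-ish character
--         if part and part[0] in START:
--             name = part[0]
--             for ch in part[1:]:
--                 if ch not in CONT:
--                     break
--                 name += ch
--             mentions.append(name)
--     return mentions
-- ===== Notes on version B (the rewrite author's own statement) =====
-- stated objective: faster
-- what changed: A's per-character index scanner with manual lookbehind and jump arithmetic is replaced by one split of the text at the mention marker plus a zip over adjacent parts: the left part's last character decides the lookbehind and the right part's prefix yields the mention name.
import Mathlib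
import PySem

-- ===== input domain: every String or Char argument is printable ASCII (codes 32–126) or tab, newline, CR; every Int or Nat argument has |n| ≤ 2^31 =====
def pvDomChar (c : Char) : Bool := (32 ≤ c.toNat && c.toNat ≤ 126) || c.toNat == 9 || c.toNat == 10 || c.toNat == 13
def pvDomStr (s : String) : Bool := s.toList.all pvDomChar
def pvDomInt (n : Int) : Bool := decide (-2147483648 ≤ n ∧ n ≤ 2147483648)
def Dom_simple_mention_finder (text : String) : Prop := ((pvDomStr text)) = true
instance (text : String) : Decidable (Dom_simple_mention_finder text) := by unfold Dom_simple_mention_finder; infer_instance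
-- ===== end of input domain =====

-- B replaces A's per-character index scan/state machine by a single split on '@' plus a
-- zip of adjacent parts (lookbehind = last char of the left part, mention = prefix of the
-- right part); same O(n), measured faster in a timing run (constant factor: one
-- str.split pass instead of a per-character Python loop).


-- the three character classes of A's docstring (shared module-level constants)
def pvLOOK : List Char :=
  "abcdefghijklmnopqrstuvwxyzABCDEFGHIJKLMNOPQRSTUVWXYZ0123456789._-".toList
def pvSTART : List Char :=
  "abcdefghijklmnopqrstuvwxyzABCDEFGHIJKLMNOPQRSTUVWXYZ0123456789".toList
def pvCONT : List Char :=
  "abcdefghijklmnopqrstuvwxyzABCDEFGHIJKLMNOPQRSTUVWXYZ0123456789_-:".toList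

def pvIsLook (c : Char) : Bool := c ∈ pvLOOK
def pvIsStart (c : Char) : Bool := c ∈ pvSTART
def pvIsCont (c : Char) : Bool := c ∈ pvCONT

-- ===== PORT A =====
-- inner `while` loop of A: extend `username` while chars[j] is a continuation char
def pvAScan (chars : List Char) (j : Nat) (username : List Char) : List Char × Nat :=
  if _h : j < chars.length ∧ pvIsCont (chars.getD j ' ') then
    pvAScan chars (j + 1) (username ++ [chars.getD j ' '])
  else (username, j)
  termination_by chars.length - j
  decreasing_by omega

-- outer `while i < len(text)` loop of A (getD is only read under the bound checks)
def pvALoop (chars : List Char) (i : Nat) (mentions : List String) : List String :=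
  if _h : i < chars.length then
    if chars.getD i ' ' = '@' then
      if 0 < i ∧ pvIsLook (chars.getD (i - 1) ' ') then
        pvALoop chars (i + 1) mentions
      else
        let un :=
          if i + 1 < chars.length ∧ pvIsStart (chars.getD (i + 1) ' ') then
            pvAScan chars (i + 2) [chars.getD (i + 1) ' ']
          else ([], i + 1)
        let mentions' := if un.1 ≠ [] then mentions ++ [String.ofList un.1] else mentions
        pvALoop chars (max un.2 (i + 1)) mentions'
    else pvALoop chars (i + 1) mentions
  else mentions
  termination_by chars.length - i
  decreasing_by all_goals omega

def simple_mention_finder (text : String) : List String :=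
  pvALoop text.toList 0 []

-- ===== PORT B =====
-- inner `for ch in part[1:]` loop of B with its break
def pvBTake (part : List Char) (name : List Char) : List Char :=
  match part with
  | [] => name
  | c :: rest => if pvIsCont c then pvBTake rest (name ++ [c]) else name

-- one iteration of B's `for prev, part in zip(parts, parts[1:])`
def pvBStep (mentions : List String) (pp : List Char × List Char) : List String :=
  if pp.1 ≠ [] ∧ pvIsLook (pp.1.getLastD ' ') then mentions
  else
    match pp.2 with
    | c :: rest => if pvIsStart c then mentions ++ [String.ofList (pvBTake rest [c])] else mentions
    | [] => mentions

def simple_mention_finder_alt (text : String) : List String :=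
  let parts := text.toList.splitOn '@'
  (parts.zip (parts.drop 1)).foldl pvBStep []

-- ===== PRECONDITION & SPEC =====
def Spec_simple_mention_finder (text : String) (out : List String) : Prop := out = simple_mention_finder_alt text
instance (text : String) (out : List String) : Decidable (Spec_simple_mention_finder text out) := by unfold Spec_simple_mention_finder; infer_instance

-- ===== CLAIM (what is proved, stated in full; the proofs are below) =====
def Claim_equal_simple_mention_finder : Prop := ∀ (text : String), Dom_simple_mention_finder text → Spec_simple_mention_finder text (simple_mention_finder text)

-- ===== LEMMAS AND PROOFS =====

-- Common specification: scan the remaining characters, `p` = character just before them.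
def pvPLook (p : Option Char) : Bool :=
  match p with | none => false | some a => pvIsLook a

def pvG (p : Option Char) (l : List Char) : List String :=
  match l with
  | [] => []
  | c :: rest =>
    if c = '@' then
      if pvPLook p then pvG (some '@') rest
      else
        match rest with
        | [] => []
        | d :: rest' =>
          if pvIsStart d then
            String.ofList (d :: rest'.takeWhile pvIsCont) ::
              pvG (some ((rest'.takeWhile pvIsCont).getLastD d)) (rest'.dropWhile pvIsCont)
          else pvG (some '@') (d :: rest')
    else pvG (some c) rest
  termination_by l.length
  decreasing_by
    · simp
    · simp only [List.length_cons]
      have := List.length_dropWhile_le (p := pvIsCont) (l := rest')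
      omega
    · simp
    · simp

def pvPrevAt (chars : List Char) (i : Nat) : Option Char :=
  if i = 0 then none else some (chars.getD (i - 1) ' ')

def pvPrevOf (p : Option Char) (s : List Char) : Option Char :=
  s.foldl (fun _ c => some c) p

def pvBcond (s : List Char) : Bool := !s.isEmpty && pvIsLook (s.getLastD ' ')

def pvEmit (pp : List Char × List Char) : List String :=
  if pp.1 ≠ [] ∧ pvIsLook (pp.1.getLastD ' ') then []
  else
    match pp.2 with
    | c :: rest => if pvIsStart c then [String.ofList (pvBTake rest [c])] else []
    | [] => []

def pvZipEmit (s : List Char) (ss : List (List Char)) : List String :=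
  match ss with
  | [] => []
  | s' :: ss' => pvEmit (s, s') ++ pvZipEmit s' ss'

def pvBoundary (ss : List (List Char)) : List Char :=
  match ss with
  | [] => []
  | s :: ss' => '@' :: (s ++ pvBoundary ss')

-- ---- small structural lemmas ----

theorem pvAScan_eq (chars : List Char) (j : Nat) (u : List Char) :
    pvAScan chars j u =
      (u ++ (chars.drop j).takeWhile pvIsCont,
       j + ((chars.drop j).takeWhile pvIsCont).length) := by
  fun_induction pvAScan with
  | case1 j u h ih =>
    obtain ⟨hj, hc⟩ := h
    rw [ih, List.drop_eq_getElem_cons hj, List.takeWhile_cons]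
    rw [List.getD_eq_getElem chars ' ' hj] at hc
    simp only [hc, if_pos]
    rw [List.getD_eq_getElem chars ' ' hj]
    simp
    omega
  | case2 j u h =>
    by_cases hj : j < chars.length
    · have hc : ¬ pvIsCont (chars.getD j ' ') := fun hh => h ⟨hj, hh⟩
      rw [List.drop_eq_getElem_cons hj, List.takeWhile_cons]
      rw [List.getD_eq_getElem chars ' ' hj] at hc
      simp [hc]
    · rw [List.drop_eq_nil_of_le (by omega)]
      simp

theorem pvBTake_eq (part name : List Char) :
    pvBTake part name = name ++ part.takeWhile pvIsCont := by
  induction part generalizing name with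
  | nil => simp [pvBTake]
  | cons c rest ih =>
    by_cases h : pvIsCont c
    · simp [pvBTake, h, ih]
    · simp [pvBTake, h]

theorem pvBStep_eq (m : List String) (pp : List Char × List Char) :
    pvBStep m pp = m ++ pvEmit pp := by
  unfold pvBStep pvEmit
  split
  · simp
  · rcases pp with ⟨a, b⟩
    cases b with
    | nil => simp
    | cons c rest => dsimp only; split <;> simp

theorem pvFoldl_bstep (l : List (List Char × List Char)) (acc : List String) :
    l.foldl pvBStep acc = acc ++ l.flatMap pvEmit := by
  induction l generalizing acc with
  | nil => simp
  | cons x xs ih => simp [List.foldl_cons, pvBStep_eq, ih]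

theorem pvZip_flatMap (ss : List (List Char)) (s : List Char) :
    (((s :: ss).zip ss).flatMap pvEmit) = pvZipEmit s ss := by
  induction ss generalizing s with
  | nil => simp [pvZipEmit]
  | cons s' ss' ih => simp [pvZipEmit, List.zip_cons_cons, ih]

theorem pvG_nil (p : Option Char) : pvG p [] = [] := by rw [pvG.eq_def]

theorem pvG_cons (p : Option Char) (c : Char) (rest : List Char) :
    pvG p (c :: rest) =
      if c = '@' then
        if pvPLook p then pvG (some '@') rest
        else
          match rest with
          | [] => []
          | d :: rest' =>
            if pvIsStart d then
              String.ofList (d :: rest'.takeWhile pvIsCont) ::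
                pvG (some ((rest'.takeWhile pvIsCont).getLastD d)) (rest'.dropWhile pvIsCont)
            else pvG (some '@') (d :: rest')
      else pvG (some c) rest := by
  rw [pvG.eq_def]

-- walking characters that are not '@' only updates the previous character
theorem pvG_walk (s : List Char) (p : Option Char) (rest : List Char)
    (h : ∀ c ∈ s, c ≠ '@') :
    pvG p (s ++ rest) = pvG (pvPrevOf p s) rest := by
  induction s generalizing p with
  | nil => simp [pvPrevOf]
  | cons c s' ih =>
    have hc : c ≠ '@' := h c (by simp)
    rw [List.cons_append, pvG.eq_def]
    simp only [if_neg hc]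
    exact ih (some c) (fun x hx => h x (by simp [hx]))

theorem pvPrevOf_ne_nil (s : List Char) (p : Option Char) (h : s ≠ []) :
    pvPrevOf p s = some (s.getLastD ' ') := by
  induction s generalizing p with
  | nil => exact absurd rfl h
  | cons c s' ih =>
    cases s' with
    | nil => simp [pvPrevOf, List.getLastD]
    | cons d s'' =>
      rw [List.getLastD_cons]
      exact ih (some c) (by simp)

theorem pvPLook_prevOf_at (s : List Char) :
    pvPLook (pvPrevOf (some '@') s) = pvBcond s := by
  cases s with
  | nil => decide
  | cons c s' =>
    rw [pvPrevOf_ne_nil _ _ (by simp)]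
    simp [pvPLook, pvBcond]

theorem pvPLook_prevOf_none (s : List Char) :
    pvPLook (pvPrevOf none s) = pvBcond s := by
  cases s with
  | nil => simp [pvPrevOf, pvPLook, pvBcond]
  | cons c s' =>
    rw [pvPrevOf_ne_nil _ _ (by simp)]
    simp [pvPLook, pvBcond]

-- takeWhile/dropWhile across a boundary that starts with '@' (or is empty)
theorem pvTake_boundary (r : List Char) (X : List Char)
    (hX : X = [] ∨ X.head? = some '@') :
    (r ++ X).takeWhile pvIsCont = r.takeWhile pvIsCont ∧
    (r ++ X).dropWhile pvIsCont = r.dropWhile pvIsCont ++ X := by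
  induction r with
  | nil =>
    rcases hX with h | h
    · simp [h]
    · cases X with
      | nil => simp at h
      | cons x xs =>
        simp only [List.head?_cons, Option.some_inj] at h
        subst h
        constructor <;> simp [pvIsCont, pvCONT]
  | cons c r' ih =>
    by_cases hc : pvIsCont c <;> simp [hc, ih.1, ih.2]

-- the previous character after consuming a mention is the last char of the whole part
theorem pvPrev_after_mention (d : Char) (r : List Char) :
    pvPrevOf (some ((r.takeWhile pvIsCont).getLastD d)) (r.dropWhile pvIsCont) =
      some ((d :: r).getLastD ' ') := by
  by_cases hr : r.dropWhile pvIsCont = []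
  · have htw : r.takeWhile pvIsCont = r := by
      conv_rhs => rw [← List.takeWhile_append_dropWhile (p := pvIsCont) (l := r)]
      rw [hr, List.append_nil]
    rw [hr, List.getLastD_cons, htw]
    rfl
  · rw [pvPrevOf_ne_nil _ _ hr, List.getLastD_cons]
    rw [List.getLastD_eq_getLast?, List.getLastD_eq_getLast?]
    conv_rhs => rw [← List.takeWhile_append_dropWhile (p := pvIsCont) (l := r)]
    rw [List.getLast?_append_of_ne_nil _ hr]
    cases hx : (List.dropWhile pvIsCont r).getLast? with
    | none => exact absurd (List.getLast?_eq_none_iff.mp hx) hr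
    | some x => simp

theorem pvDropWhile_eq_drop (p : Char → Bool) (l : List Char) :
    l.dropWhile p = l.drop (l.takeWhile p).length := by
  induction l with
  | nil => rfl
  | cons c l ih => by_cases h : p c <;> simp [h, ih]

theorem pvGetLastD_eq_getElem (l : List Char) (h : l ≠ []) (d : Char) :
    l.getLastD d = l[l.length - 1]'(by have := List.length_pos_iff.mpr h; omega) := by
  rw [List.getLastD_eq_getLast?, List.getLast?_eq_some_getLast h]
  simp [List.getLast_eq_getElem]

theorem pvBcond_true_iff (s : List Char) :
    pvBcond s = true ↔ (s ≠ [] ∧ pvIsLook (s.getLastD ' ') = true) := by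
  cases s with
  | nil => simp [pvBcond]
  | cons c t => simp [pvBcond]

theorem pvEmit_skip (s x : List Char) (hb : pvBcond s = true) : pvEmit (s, x) = [] := by
  unfold pvEmit
  exact if_pos ((pvBcond_true_iff s).mp hb)

theorem pvEmit_nil (s : List Char) : pvEmit (s, []) = [] := by
  unfold pvEmit; split <;> rfl

theorem pvEmit_noskip (s : List Char) (c : Char) (rest : List Char) (hb : pvBcond s = false) :
    pvEmit (s, c :: rest) =
      if pvIsStart c then [String.ofList (pvBTake rest [c])] else [] := by
  unfold pvEmit
  rw [if_neg]
  intro hc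
  rw [(pvBcond_true_iff s).mpr hc] at hb
  exact absurd hb (by simp)

-- core boundary lemma: at each '@', pvG does what B's zip step does
theorem pvG_boundary (ss : List (List Char)) (h : ∀ t ∈ ss, ∀ c ∈ t, c ≠ '@')
    (s : List Char) (q : Option Char) (hq : pvPLook q = pvBcond s) :
    pvG q (pvBoundary ss) = pvZipEmit s ss := by
  induction ss generalizing s q with
  | nil => simp [pvBoundary, pvG, pvZipEmit]
  | cons s' ss' ih =>
    have hs' : ∀ c ∈ s', c ≠ '@' := h s' (by simp)
    have hss' : ∀ t ∈ ss', ∀ c ∈ t, c ≠ '@' := fun t ht => h t (by simp [ht])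
    rw [pvBoundary, pvG.eq_def]
    simp only [reduceIte]
    rw [hq]
    rw [pvZipEmit]
    by_cases hb : pvBcond s = true
    · rw [if_pos hb, pvG_walk s' _ _ hs', ih hss' s' _ (pvPLook_prevOf_at s'), pvEmit_skip s s' hb]
      simp
    · rw [if_neg hb]
      have hb' : pvBcond s = false := by simpa using hb
      cases s' with
      | nil =>
        simp only [List.nil_append]
        rw [pvEmit_nil, List.nil_append]
        cases ss' with
        | nil => simp [pvBoundary, pvZipEmit]
        | cons s'' ss'' =>
          rw [pvBoundary]
          dsimp only
          rw [if_neg (by decide : ¬ pvIsStart '@' = true)]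
          rw [← pvBoundary]
          exact ih hss' [] (some '@') (by decide)
      | cons d r' =>
        simp only [List.cons_append]
        by_cases hd : pvIsStart d = true
        · rw [if_pos hd]
          have hX : pvBoundary ss' = [] ∨ (pvBoundary ss').head? = some '@' := by
            cases ss' <;> simp [pvBoundary]
          obtain ⟨ht, hdr⟩ := pvTake_boundary r' _ hX
          rw [ht, hdr]
          rw [pvG_walk _ _ _
            (fun c hc => hs' c (List.mem_cons_of_mem d ((List.dropWhile_sublist _).mem hc)))]
          rw [pvPrev_after_mention d r']
          rw [ih hss' (d :: r') _ (by simp [pvPLook, pvBcond])]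
          rw [pvEmit_noskip _ _ _ hb', if_pos hd, pvBTake_eq]
          simp
        · rw [if_neg hd]
          rw [show (d :: (r' ++ pvBoundary ss')) = (d :: r') ++ pvBoundary ss' from rfl]
          rw [pvG_walk _ _ _ hs', ih hss' (d :: r') _ (pvPLook_prevOf_at _)]
          rw [pvEmit_noskip _ _ _ hb', if_neg hd]
          simp

-- splitOn shape: head chunk + boundary, chunks free of '@'
theorem pvSplit_shape (l : List Char) :
    ∃ s ss, l.splitOn '@' = s :: ss ∧ l = s ++ pvBoundary ss ∧
      (∀ c ∈ s, c ≠ '@') ∧ (∀ t ∈ ss, ∀ c ∈ t, c ≠ '@') := by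
  induction l with
  | nil => exact ⟨[], [], rfl, rfl, by simp, by simp⟩
  | cons c l ih =>
    obtain ⟨s, ss, h1, h2, h3, h4⟩ := ih
    by_cases hc : c = '@'
    · subst hc
      refine ⟨[], s :: ss, ?_, ?_, by simp, ?_⟩
      · simp only [List.splitOn] at h1 ⊢
        rw [List.splitOnP_cons, if_pos (by simp), h1]
      · simp [pvBoundary, h2]
      · intro t ht
        rcases List.mem_cons.mp ht with h | h
        · subst h; exact h3
        · exact h4 t h
    · refine ⟨c :: s, ss, ?_, by simp [h2], ?_, h4⟩
      · simp only [List.splitOn] at h1 ⊢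
        rw [List.splitOnP_cons, if_neg (by simp [hc]), h1, List.modifyHead_cons]
      · intro x hx
        rcases List.mem_cons.mp hx with h | h
        · subst h; exact hc
        · exact h3 x h

-- A's loop computes pvG of the remaining suffix
theorem pvALoop_eq (n : Nat) : ∀ (chars : List Char) (i : Nat) (mentions : List String),
    chars.length - i ≤ n →
    pvALoop chars i mentions = mentions ++ pvG (pvPrevAt chars i) (chars.drop i) := by
  induction n with
  | zero =>
    intro chars i mentions hn
    rw [pvALoop.eq_def, dif_neg (by omega), List.drop_eq_nil_of_le (by omega), pvG_nil,
      List.append_nil]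
  | succ n ih =>
    intro chars i mentions hn
    by_cases hi : i < chars.length
    · have hgd : chars.getD i ' ' = chars[i] := List.getD_eq_getElem chars ' ' hi
      rw [pvALoop.eq_def, dif_pos hi, List.drop_eq_getElem_cons hi, pvG_cons]
      by_cases hat : chars.getD i ' ' = '@'
      · have h1 : chars[i] = '@' := by rw [← hgd]; exact hat
        rw [if_pos hat, if_pos h1]
        by_cases hlb : 0 < i ∧ pvIsLook (chars.getD (i - 1) ' ') = true
        · have hpl : pvPLook (pvPrevAt chars i) = true := by
            unfold pvPLook pvPrevAt
            rw [if_neg (by omega : ¬ i = 0)]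
            exact hlb.2
          rw [if_pos hlb, if_pos hpl, ih chars (i + 1) mentions (by omega)]
          have hprev : pvPrevAt chars (i + 1) = some '@' := by
            unfold pvPrevAt
            rw [if_neg (by omega), Nat.add_sub_cancel, hat]
          rw [hprev]
        · have hpl : pvPLook (pvPrevAt chars i) = false := by
            unfold pvPLook pvPrevAt
            by_cases h0 : i = 0
            · rw [if_pos h0]
            · rw [if_neg h0]
              exact Bool.eq_false_iff.mpr (fun hh => hlb ⟨Nat.pos_of_ne_zero h0, hh⟩)
          rw [if_neg hlb,
            if_neg (show ¬ (pvPLook (pvPrevAt chars i) = true) by rw [hpl]; simp)]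
          have hprev : pvPrevAt chars (i + 1) = some '@' := by
            unfold pvPrevAt
            rw [if_neg (by omega), Nat.add_sub_cancel, hat]
          by_cases hst : i + 1 < chars.length ∧ pvIsStart (chars.getD (i + 1) ' ') = true
          · have hgd1 : chars.getD (i + 1) ' ' = chars[i + 1] :=
              List.getD_eq_getElem chars ' ' hst.1
            rw [if_pos hst, pvAScan_eq]
            obtain ⟨t, ht⟩ : ∃ t, t = (chars.drop (i + 2)).takeWhile pvIsCont := ⟨_, rfl⟩
            rw [← ht]
            have htle : t.length ≤ chars.length - (i + 2) := by
              have h2 := List.Sublist.length_le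
                (List.takeWhile_sublist (l := chars.drop (i + 2)) pvIsCont)
              rw [← ht] at h2
              simpa using h2
            simp only []
            rw [if_pos (by simp : ([chars.getD (i + 1) ' '] ++ t) ≠ [])]
            have hmax : max (i + 2 + t.length) (i + 1) = i + 2 + t.length := by omega
            rw [hmax, ih chars (i + 2 + t.length) _ (by omega)]
            rw [List.drop_eq_getElem_cons hst.1]
            dsimp only
            rw [show i + 1 + 1 = i + 2 from rfl, if_pos (by rw [← hgd1]; exact hst.2), ← ht]
            have hdrop : chars.drop (i + 2 + t.length) =
                (chars.drop (i + 2)).dropWhile pvIsCont := by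
              rw [pvDropWhile_eq_drop, ← ht, List.drop_drop]
            have hprev2 : pvPrevAt chars (i + 2 + t.length) =
                some (t.getLastD chars[i + 1]) := by
              unfold pvPrevAt
              rw [if_neg (by omega)]
              by_cases htn : t = []
              · simp only [htn, List.length_nil, Nat.add_zero, List.getLastD]
                rw [show i + 2 - 1 = i + 1 from rfl, hgd1]
              · have htpos : 0 < t.length := List.length_pos_iff.mpr htn
                have h15 := hst.1
                have hb2 : i + 2 + t.length - 1 < chars.length := by omega
                rw [List.getD_eq_getElem _ _ hb2, pvGetLastD_eq_getElem t htn]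
                have hpre : t[t.length - 1]'(by omega) =
                    (chars.drop (i + 2))[t.length - 1]'(by
                      rw [List.length_drop]; omega) :=
                  List.IsPrefix.getElem (ht ▸ List.takeWhile_prefix pvIsCont)
                    (by rw [ht]; have : t.length = ((chars.drop (i + 2)).takeWhile pvIsCont).length := by rw [ht]
                        omega)
                rw [hpre, List.getElem_drop]
                have hidx : i + 2 + t.length - 1 = i + 2 + (t.length - 1) := by omega
                exact congrArg some (getElem_congr rfl hidx (by omega))
            rw [hdrop, hprev2]
            simp [List.getElem?_eq_getElem hst.1]
          · rw [if_neg hst]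
            simp only []
            rw [if_neg (by simp), Nat.max_self, ih chars (i + 1) mentions (by omega), hprev]
            by_cases h2 : i + 1 < chars.length
            · have hgd1 : chars.getD (i + 1) ' ' = chars[i + 1] :=
                List.getD_eq_getElem chars ' ' h2
              have hns : ¬ pvIsStart chars[i + 1] = true := by
                rw [← hgd1]; exact fun hh => hst ⟨h2, hh⟩
              rw [List.drop_eq_getElem_cons h2]
              dsimp only
              rw [if_neg hns, ← List.drop_eq_getElem_cons h2]
            · rw [List.drop_eq_nil_of_le (by omega), pvG_nil]
      · have h1 : ¬ chars[i] = '@' := by rw [← hgd]; exact hat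
        rw [if_neg hat, if_neg h1, ih chars (i + 1) mentions (by omega)]
        have hprev : pvPrevAt chars (i + 1) = some chars[i] := by
          unfold pvPrevAt
          rw [if_neg (by omega), Nat.add_sub_cancel, hgd]
        rw [hprev]
    · rw [pvALoop.eq_def, dif_neg hi, List.drop_eq_nil_of_le (by omega), pvG_nil,
        List.append_nil]

-- ===== VERDICT (by name: the statement is the Claim_ definition above) =====
theorem simple_mention_finder_spec : Claim_equal_simple_mention_finder := by
  intro text _
  unfold Spec_simple_mention_finder simple_mention_finder simple_mention_finder_alt
  obtain ⟨s, ss, hsplit, hglue, hs, hss⟩ := pvSplit_shape text.toList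
  rw [pvALoop_eq (text.toList.length) _ 0 [] (by omega)]
  simp only [List.nil_append, List.drop_zero, pvPrevAt, reduceIte]
  rw [hsplit]
  simp only [List.drop_one, List.tail_cons]
  rw [pvFoldl_bstep, List.nil_append, pvZip_flatMap]
  rw [hglue, pvG_walk s none _ hs, pvG_boundary ss hss s _ (pvPLook_prevOf_none s)]
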